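-- pv_equiv track=rewrite | github.com/chlendyd7/Algorithm | 보통_취준생을_위한_알고리즘/september/sep_second_week/240910/겹치는건 싫어.py | solution
-- ===== SOURCE A (Python) =====
-- from collections import defaultdict
--
-- def solution(n,k,ls):
--     answer = 0
--     start = 0
--     end = 0
--     check_dic = defaultdict(int)
--
--     while end < n:
--         if check_dic[ls[end]] >= k:
--             check_dic[ls[start]] -= 1
--             start += 1
--         else:
--             check_dic[ls[end]] += 1
--             end += 1
--             answer = max(answer, end-start)
--     return answer
-- ===== SOURCE B (Python) =====
-- def solution(n, k, ls):
--     positions = {}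
--     answer = 0
--     start = 0
--     for end in range(n):
--         occ = positions.get(ls[end], []) + [end]
--         positions[ls[end]] = occ
--         if len(occ) > k:
--             start = max(start, occ[-k - 1] + 1)
--         answer = max(answer, end - start + 1)
--     return answer
-- ===== Notes on version B (the rewrite author's own statement) =====
-- stated objective: alternative
-- what changed: Replaces the while-loop sliding window that decrements a running count dict to move start one step at a time by a per-value occurrence-position index: one for-loop over end, appending end to positions[ls[end]] and jumping start directly to max(start, occ[-k-1]+1) when the value would exceed k occurrences.
-- outside the precondition, e.g. on solution(4, -1, [2, 0, 0, 0, 1, 0, 2]): A returns 0, B returns 2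
import Mathlib
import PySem

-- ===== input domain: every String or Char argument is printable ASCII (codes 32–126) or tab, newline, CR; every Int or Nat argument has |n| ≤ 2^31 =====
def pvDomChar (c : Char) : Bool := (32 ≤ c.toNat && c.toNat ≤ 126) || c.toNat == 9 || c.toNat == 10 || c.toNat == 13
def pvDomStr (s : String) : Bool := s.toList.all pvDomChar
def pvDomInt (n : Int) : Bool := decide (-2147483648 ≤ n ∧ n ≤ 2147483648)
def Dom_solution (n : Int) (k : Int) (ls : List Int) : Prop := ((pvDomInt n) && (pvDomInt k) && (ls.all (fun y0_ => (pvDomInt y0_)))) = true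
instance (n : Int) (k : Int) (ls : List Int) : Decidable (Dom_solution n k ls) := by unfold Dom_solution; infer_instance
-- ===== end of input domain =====

-- B replaces A's one-step-at-a-time sliding window (count dict, start decremented step by step)
-- by a per-value occurrence-position index with direct jumps of start (alternative algorithm, same cost class).

-- ===== PORT A =====
-- the while-loop of A; fuel bounds the number of iterations (2*n+1 provably suffices on Pre_);
-- `none` from pyGet? = Python IndexError, excluded by Pre_
def solutionLoop (n k : Int) (ls : List Int) : Nat → Int → Int → Int → PySem.Dict Int Int → Int
  | 0, answer, _, _, _ => answer
  | fuel+1, answer, start, e, cnt =>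
    if e < n then
      match PySem.List.pyGet? ls e with
      | none => answer
      | some v =>
        if cnt.getD v 0 ≥ k then
          match PySem.List.pyGet? ls start with
          | none => answer
          | some w => solutionLoop n k ls fuel answer (start+1) e (cnt.insert w (cnt.getD w 0 - 1))
        else
          solutionLoop n k ls fuel (max answer (e+1-start)) start (e+1) (cnt.insert v (cnt.getD v 0 + 1))
    else answer

def solution (n : Int) (k : Int) (ls : List Int) : Int :=
  solutionLoop n k ls ((2*n).toNat+1) 0 0 0 PySem.Dict.empty

-- ===== PORT B =====
-- one iteration of B's for-loop: state = (answer, start, positions)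
def solutionAltStep (k : Int) (ls : List Int)
    (st : Int × Int × PySem.Dict Int (List Int)) (e : Int) : Int × Int × PySem.Dict Int (List Int) :=
  match PySem.List.pyGet? ls e with
  | none => st  -- Python IndexError, excluded by Pre_
  | some v =>
    let occ := st.2.2.getD v [] ++ [e]
    let positions := st.2.2.insert v occ
    let start := if k < (occ.length : Int) then
        match PySem.List.pyGet? occ (-k-1) with
        | none => st.2.1  -- unreachable: 0 ≤ k < len occ makes the index valid
        | some p => max st.2.1 (p+1)
      else st.2.1
    (max st.1 (e - start + 1), start, positions)

def solution_alt (n : Int) (k : Int) (ls : List Int) : Int :=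
  ((PySem.List.pyRange 0 n 1).foldl (solutionAltStep k ls)
    ((0:Int), (0:Int), (PySem.Dict.empty : PySem.Dict Int (List Int)))).1

-- ===== PRECONDITION & SPEC =====
-- Pre_ excludes negative k (there A either raises IndexError or, by driving dict counts negative,
-- returns an accidental 0) and n > len(ls) (A raises IndexError).
def Pre_solution (n : Int) (k : Int) (ls : List Int) : Prop := 0 ≤ k ∧ n ≤ (ls.length : Int)
instance (n : Int) (k : Int) (ls : List Int) : Decidable (Pre_solution n k ls) := by unfold Pre_solution; infer_instance
def pvWitness_solution : Int × Int × List Int := (5, 2, [1, 2, 1, 1, 2])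
def Spec_solution (n : Int) (k : Int) (ls : List Int) (out : Int) : Prop := out = solution_alt n k ls
instance (n : Int) (k : Int) (ls : List Int) (out : Int) : Decidable (Spec_solution n k ls out) := by unfold Spec_solution; infer_instance

-- ===== CLAIM (what is proved, stated in full; the proofs are below) =====
def Claim_equal_solution : Prop := ∀ (n : Int) (k : Int) (ls : List Int), Dom_solution n k ls → Pre_solution n k ls → Spec_solution n k ls (solution n k ls)

-- ===== LEMMAS AND PROOFS =====

-- indices i < e with ls[i] = v, in increasing order
def occN (ls : List Int) (v : Int) (e : Nat) : List Nat :=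
  (List.range e).filter (fun i => ls.getD i 0 == v)

-- number of occurrences of v in the window [s, e)
def cntW (ls : List Int) (v : Int) (s e : Nat) : Nat :=
  (occN ls v e).countP (fun i => decide (s ≤ i))

-- the window start the sliding window has after processing indices < e
def refStart (ls : List Int) (kN : Nat) : Nat → Nat
  | 0 => 0
  | e+1 =>
    let o := occN ls (ls.getD e 0) (e+1)
    if kN + 1 ≤ o.length then max (refStart ls kN e) (o.getD (o.length - (kN+1)) 0 + 1)
    else refStart ls kN e

-- the answer accumulated over the remaining t indices starting at e
def refGo (ls : List Int) (kN : Nat) : Nat → Nat → Int → Int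
  | 0, _, ans => ans
  | t+1, e, ans => refGo ls kN t (e+1) (max ans ((e:Int) + 1 - (refStart ls kN (e+1) : Int)))

-- the first occurrence of v in [s, e)
def firstOcc (ls : List Int) (v : Int) (s e : Nat) : Nat :=
  ((occN ls v e).filter (fun i => decide (s ≤ i))).getD 0 0

lemma occN_succ (ls : List Int) (v : Int) (e : Nat) :
    occN ls v (e+1) = occN ls v e ++ if ls.getD e 0 = v then [e] else [] := by
  simp [occN, List.range_succ, List.filter_append, List.filter_singleton]

lemma mem_occN {ls : List Int} {v : Int} {e i : Nat} :
    i ∈ occN ls v e ↔ i < e ∧ ls.getD i 0 = v := by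
  simp [occN, List.mem_filter, List.mem_range]

lemma sorted_occN (ls : List Int) (v : Int) (e : Nat) :
    (occN ls v e).Pairwise (· < ·) :=
  List.Pairwise.sublist List.filter_sublist (List.pairwise_lt_range)

lemma countP_split (l : List Nat) (s : Nat) :
    l.countP (fun i => decide (s ≤ i)) = l.count s + l.countP (fun i => decide (s+1 ≤ i)) := by
  induction l with
  | nil => simp
  | cons a t ih =>
    rcases Nat.lt_trichotomy a s with h|h|h
    · simp only [List.countP_cons, List.count_cons, ih, beq_iff_eq]
      simp [show ¬ s ≤ a by omega, show ¬ a = s by omega, show ¬ s+1 ≤ a by omega]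
    · simp only [List.countP_cons, List.count_cons, ih, beq_iff_eq]
      simp [h, show ¬ s+1 ≤ a by omega]
      omega
    · simp only [List.countP_cons, List.count_cons, ih, beq_iff_eq]
      simp [show s ≤ a by omega, show ¬ a = s by omega, show s+1 ≤ a by omega]
      omega

lemma count_occN (ls : List Int) (v : Int) (e s : Nat) :
    (occN ls v e).count s = if s < e ∧ ls.getD s 0 = v then 1 else 0 := by
  have hn : (occN ls v e).Nodup := List.Nodup.sublist List.filter_sublist (List.nodup_range)
  by_cases hm : s ∈ occN ls v e
  · rw [if_pos (mem_occN.1 hm)]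
    exact List.count_eq_one_of_mem hn hm
  · rw [if_neg (fun hc => hm (mem_occN.2 hc))]
    exact List.count_eq_zero.2 hm

lemma cntW_drop (ls : List Int) (v : Int) (s e : Nat) :
    cntW ls v s e = (occN ls v e).count s + cntW ls v (s+1) e := by
  simpa [cntW] using countP_split (occN ls v e) s

lemma cntW_succ (ls : List Int) (v : Int) (s e : Nat) :
    cntW ls v s (e+1) =
      cntW ls v s e + (if ls.getD e 0 = v ∧ s ≤ e then 1 else 0) := by
  simp only [cntW, occN_succ, List.countP_append, List.getD_eq_getElem?_getD]
  by_cases h : ls[e]?.getD 0 = v <;> by_cases hs : s ≤ e <;> simp [h, hs] <;> omega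

lemma head_le_of_sorted {l : List Nat} (h : l.Pairwise (· < ·)) {x : Nat} (hx : x ∈ l) :
    l.getD 0 0 ≤ x := by
  cases l with
  | nil => cases hx
  | cons a t =>
    rcases List.mem_cons.1 hx with rfl | hxt
    · simp
    · simpa using ((List.pairwise_cons.1 h).1 x hxt).le

lemma pyget_some {ls : List Int} {e : Nat} (h : e < ls.length) :
    PySem.List.pyGet? ls (e : Int) = some (ls.getD e 0) := by
  simp [PySem.List.pyGet?_natCast, List.getElem?_eq_getElem h, List.getD_eq_getElem?_getD]

lemma refStart_le (ls : List Int) (kN : Nat) : ∀ e, refStart ls kN e ≤ e := by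
  intro e
  induction e with
  | zero => simp [refStart]
  | succ e ih =>
    simp only [refStart]
    split
    · rename_i h
      have hidx : (occN ls (ls.getD e 0) (e+1)).length - (kN+1) < (occN ls (ls.getD e 0) (e+1)).length := by omega
      have hmem : (occN ls (ls.getD e 0) (e+1)).getD ((occN ls (ls.getD e 0) (e+1)).length - (kN+1)) 0 ∈ occN ls (ls.getD e 0) (e+1) := by
        rw [List.getD_eq_getElem _ _ hidx]; exact List.getElem_mem _
      have := (mem_occN.1 hmem).1
      omega
    · omega

lemma refStart_succ_ge (ls : List Int) (kN : Nat) (e : Nat) :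
    refStart ls kN e ≤ refStart ls kN (e+1) := by
  conv_rhs => simp only [refStart]
  split
  · exact le_max_left _ _
  · exact le_refl _

lemma refStart_mono (ls : List Int) (kN : Nat) {e e' : Nat} (h : e ≤ e') :
    refStart ls kN e ≤ refStart ls kN e' := by
  induction e' with
  | zero => simpa [Nat.le_zero.1 h]
  | succ e' ih =>
    rcases Nat.lt_or_ge e (e'+1) with h1 | h1
    · exact le_trans (ih (by omega)) (refStart_succ_ge ls kN e')
    · have : e = e'+1 := by omega
      subst this; exact le_refl _

lemma sorted_partition {l : List Nat} (h : l.Pairwise (· < ·)) (s : Nat) :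
    l = l.filter (fun i => decide (i < s)) ++ l.filter (fun i => decide (s ≤ i)) := by
  induction l with
  | nil => simp
  | cons a t ih =>
    rcases List.pairwise_cons.1 h with ⟨ha, ht⟩
    by_cases hcase : a < s
    · simpa [List.filter_cons, hcase, Nat.not_le.2 hcase] using ih ht
    · have h1 : t.filter (fun i => decide (i < s)) = [] :=
        List.filter_eq_nil_iff.2 (fun x hx => by
          simp only [decide_eq_true_eq, Nat.not_lt]
          exact le_trans (Nat.le_of_not_lt hcase) (ha x hx).le)
      have h2 : t.filter (fun i => decide (s ≤ i)) = t :=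
        List.filter_eq_self.2 (fun x hx => by
          simp only [decide_eq_true_eq]
          exact le_trans (Nat.le_of_not_lt hcase) (ha x hx).le)
      simp [List.filter_cons, hcase, Nat.le_of_not_lt hcase, h1, h2]

lemma bridge1 {ls : List Int} {v : Int} {s e kN : Nat}
    (he : ls.getD e 0 = v) (hc : cntW ls v s e = kN) (hk : 1 ≤ kN) (hse : s ≤ e) :
    kN + 1 ≤ (occN ls v (e+1)).length ∧
    (occN ls v (e+1)).getD ((occN ls v (e+1)).length - (kN+1)) 0 = firstOcc ls v s e ∧
    s ≤ firstOcc ls v s e ∧ firstOcc ls v s e < e ∧ ls.getD (firstOcc ls v s e) 0 = v := by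
  set P := (occN ls v e).filter (fun i => decide (i < s)) with hP
  set F := (occN ls v e).filter (fun i => decide (s ≤ i)) with hF
  have hsplit : occN ls v e = P ++ F := sorted_partition (sorted_occN ls v e) s
  have hFlen : F.length = kN := by
    rw [hF, ← List.countP_eq_length_filter]; exact hc
  have ho : occN ls v (e+1) = P ++ (F ++ [e]) := by
    rw [occN_succ, he, if_pos rfl, hsplit, List.append_assoc]
  have hfirst : firstOcc ls v s e = F.getD 0 0 := by rw [firstOcc, hF]
  have hfo_mem : firstOcc ls v s e ∈ F := by
    rw [hfirst, List.getD_eq_getElem (F) 0 (by omega)]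
    exact List.getElem_mem _
  have hmem2 := List.mem_filter.1 hfo_mem
  have hsle : s ≤ firstOcc ls v s e := by
    have := hmem2.2; simp only [decide_eq_true_eq] at this; exact this
  refine ⟨by rw [ho]; simp [hFlen], ?_, hsle,
    (mem_occN.1 hmem2.1).1, (mem_occN.1 hmem2.1).2⟩
  rw [ho]
  have hL : (P ++ (F ++ [e])).length - (kN+1) = P.length := by simp [hFlen]
  rw [hL, List.getD_eq_getElem?_getD, List.getElem?_append_right (le_refl _), Nat.sub_self,
      List.getElem?_append_left (by omega : 0 < F.length), ← List.getD_eq_getElem?_getD, hfirst]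

lemma bridge2 {ls : List Int} {v : Int} {s e kN : Nat}
    (he : ls.getD e 0 = v) (hc : cntW ls v s e < kN) (hse : s ≤ e)
    (hlen : kN + 1 ≤ (occN ls v (e+1)).length) :
    (occN ls v (e+1)).getD ((occN ls v (e+1)).length - (kN+1)) 0 + 1 ≤ s := by
  set P := (occN ls v e).filter (fun i => decide (i < s)) with hP
  set F := (occN ls v e).filter (fun i => decide (s ≤ i)) with hF
  have hsplit : occN ls v e = P ++ F := sorted_partition (sorted_occN ls v e) s
  have hFlen : F.length = cntW ls v s e := by
    rw [hF, ← List.countP_eq_length_filter]; rfl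
  have ho : occN ls v (e+1) = P ++ (F ++ [e]) := by
    rw [occN_succ, he, if_pos rfl, hsplit, List.append_assoc]
  rw [ho] at hlen ⊢
  have hidx : (P ++ (F ++ [e])).length - (kN+1) < P.length := by
    simp only [List.length_append, List.length_cons, List.length_nil] at hlen ⊢
    omega
  have hmem : (P ++ (F ++ [e])).getD ((P ++ (F ++ [e])).length - (kN+1)) 0 ∈ P := by
    rw [List.getD_eq_getElem?_getD, List.getElem?_append_left hidx,
        List.getElem?_eq_getElem hidx]
    exact List.getElem_mem _
  have := (List.mem_filter.1 hmem).2
  simp only [decide_eq_true_eq] at this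
  omega

lemma firstOcc_spec {ls : List Int} {v : Int} {s e : Nat} (hne : cntW ls v s e ≠ 0) :
    s ≤ firstOcc ls v s e ∧ firstOcc ls v s e < e ∧ ls.getD (firstOcc ls v s e) 0 = v := by
  have hlen : ((occN ls v e).filter (fun i => decide (s ≤ i))).length ≠ 0 := by
    rw [← List.countP_eq_length_filter]; exact hne
  have hmem : firstOcc ls v s e ∈ (occN ls v e).filter (fun i => decide (s ≤ i)) := by
    rw [firstOcc, List.getD_eq_getElem _ _ (by omega)]
    exact List.getElem_mem _
  have h2 := List.mem_filter.1 hmem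
  refine ⟨by simpa using h2.2, (mem_occN.1 h2.1).1, (mem_occN.1 h2.1).2⟩

lemma firstOcc_self {ls : List Int} {v : Int} {s e : Nat}
    (hse : s < e) (hv : ls.getD s 0 = v) : firstOcc ls v s e = s := by
  have hmemF : s ∈ (occN ls v e).filter (fun i => decide (s ≤ i)) :=
    List.mem_filter.2 ⟨mem_occN.2 ⟨hse, hv⟩, by simp⟩
  have hsorted : ((occN ls v e).filter (fun i => decide (s ≤ i))).Pairwise (· < ·) :=
    List.Pairwise.sublist List.filter_sublist (sorted_occN ls v e)
  have h1 : firstOcc ls v s e ≤ s := head_le_of_sorted hsorted hmemF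
  have hne : cntW ls v s e ≠ 0 := by
    rw [cntW, List.countP_eq_length_filter]
    intro h0
    rw [List.length_eq_zero_iff.1 h0] at hmemF
    cases hmemF
  exact le_antisymm h1 (firstOcc_spec hne).1

lemma firstOcc_shift {ls : List Int} {v : Int} {s e : Nat}
    (hv : ls.getD s 0 ≠ v) : firstOcc ls v (s+1) e = firstOcc ls v s e := by
  rw [firstOcc, firstOcc]
  congr 1
  apply List.filter_congr
  intro x hx
  have : x ≠ s := by
    intro rfl_; subst rfl_; exact hv (mem_occN.1 hx).2
  simp only [decide_eq_decide]
  omega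

lemma inner_lemma {n k : Int} {ls : List Int} {m kN : Nat}
    (hn : n = (m : Int)) (hk : k = (kN : Int)) (hml : m ≤ ls.length) (hkN : 1 ≤ kN)
    {e : Nat} (hem : e < m) :
    ∀ d s ans cnt g, e - s = d → s ≤ e →
    (∀ u, cnt.getD u 0 = (cntW ls u s e : Int)) →
    cntW ls (ls.getD e 0) s e = kN →
    ∃ cnt' : PySem.Dict Int Int,
      (∀ u, cnt'.getD u 0 = (cntW ls u (firstOcc ls (ls.getD e 0) s e + 1) e : Int)) ∧
      cntW ls (ls.getD e 0) (firstOcc ls (ls.getD e 0) s e + 1) e = kN - 1 ∧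
      solutionLoop n k ls (g + (firstOcc ls (ls.getD e 0) s e + 1 - s)) ans (s : Int) (e : Int) cnt
        = solutionLoop n k ls g ans ((firstOcc ls (ls.getD e 0) s e + 1 : Nat) : Int) (e : Int) cnt' := by
  intro d
  induction d with
  | zero =>
    intro s ans cnt g hd hse hmod hc
    exfalso
    have : s = e := by omega
    subst this
    have := firstOcc_spec (ls := ls) (v := ls.getD s 0) (s := s) (e := s) (by rw [hc]; omega)
    omega
  | succ d ih =>
    intro s ans cnt g hd hse hmod hc
    have hfo := firstOcc_spec (ls := ls) (v := ls.getD e 0) (s := s) (e := e) (by rw [hc]; omega)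
    set v := ls.getD e 0 with hv
    set fo := firstOcc ls v s e with hfo_def
    have hsl : s < ls.length := by omega
    have hel : e < ls.length := by omega
    have hlt : (e : Int) < n := by rw [hn]; exact_mod_cast hem
    have hfuel : g + (fo + 1 - s) = (g + (fo - s)) + 1 := by omega
    rw [hfuel, solutionLoop, if_pos hlt, pyget_some hel]
    dsimp only
    rw [← hv, if_pos (by rw [hmod, hc, hk]), pyget_some hsl]
    dsimp only
    -- state after one then-step
    have hmod1 : ∀ u, (cnt.insert (ls.getD s 0) (cnt.getD (ls.getD s 0) 0 - 1)).getD u 0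
        = (cntW ls u (s+1) e : Int) := by
      intro u
      rw [PySem.Dict.getD_insert]
      split
      · next hu =>
        rw [hu, hmod, cntW_drop ls (ls.getD s 0) s e, count_occN, if_pos ⟨by omega, rfl⟩]
        push_cast; ring
      · next hu =>
        rw [hmod, cntW_drop ls u s e, count_occN, if_neg (by
          intro hcon; exact hu hcon.2.symm)]
        push_cast; ring
    by_cases hw : ls.getD s 0 = v
    · -- first occurrence is s itself: one step suffices
      have hfo_s : fo = s := by rw [hfo_def]; exact firstOcc_self (by omega) hw
      have hc1 : cntW ls v (s+1) e = kN - 1 := by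
        have := cntW_drop ls v s e
        rw [count_occN, if_pos ⟨by omega, hw⟩] at this
        omega
      refine ⟨cnt.insert (ls.getD s 0) (cnt.getD (ls.getD s 0) 0 - 1), ?_, ?_, ?_⟩
      · intro u; rw [hmod1 u, hfo_s]
      · rw [hfo_s]; exact hc1
      · rw [hfo_s]
        have : (s : Int) + 1 = ((s + 1 : Nat) : Int) := by push_cast; ring
        rw [this]
        have hfz : g + (s - s) = g := by omega
        rw [hfz]
    · -- ls[s] ≠ v: step and recurse
      have hshift : firstOcc ls v (s+1) e = fo := by
        rw [hfo_def]; exact firstOcc_shift hw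
      have hc1 : cntW ls v (s+1) e = kN := by
        have := cntW_drop ls v s e
        rw [count_occN, if_neg (by intro hcon; exact hw hcon.2)] at this
        omega
      have hs1 : s + 1 ≤ e := by
        rcases Nat.lt_or_ge (s+1) (e+1) with h1 | h1
        · omega
        · exfalso
          have : s = e := by omega
          omega
      obtain ⟨cnt', hmod', hc', hloop⟩ := ih (s+1) ans _ g (by omega) hs1 hmod1 (by rw [← hv, hshift] at *; exact hc1)
      rw [hshift] at hmod' hc' hloop
      refine ⟨cnt', hmod', hc', ?_⟩
      have hfo1 : s + 1 ≤ fo := by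
        have := firstOcc_spec (ls := ls) (v := v) (s := s+1) (e := e) (by rw [hshift, ← hfo_def] at *; rw [hc1]; omega)
        rw [hshift] at this
        omega
      have harith : g + (fo - s) = g + (fo + 1 - (s+1)) := by omega
      have hcast : (s : Int) + 1 = ((s + 1 : Nat) : Int) := by push_cast; ring
      rw [hcast, harith]
      exact hloop

lemma cntW_anti (ls : List Int) (u : Int) {s s' : Nat} (e : Nat) (h : s ≤ s') :
    cntW ls u s' e ≤ cntW ls u s e := by
  apply List.countP_mono_left
  intro a _ ha
  simp only [decide_eq_true_eq] at *
  omega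

lemma outer_lemma {n k : Int} {ls : List Int} {m kN : Nat}
    (hn : n = (m : Int)) (hk : k = (kN : Int)) (hml : m ≤ ls.length) (hkN : 1 ≤ kN) :
    ∀ t e s ans cnt, e + t = m → s = refStart ls kN e → s ≤ e →
    (∀ u, cnt.getD u 0 = (cntW ls u s e : Int)) →
    (∀ u, cntW ls u s e ≤ kN) →
    ∀ g, 1 ≤ g →
    solutionLoop n k ls (g + t + (refStart ls kN m - s)) ans (s : Int) (e : Int) cnt
      = refGo ls kN t e ans := by
  intro t
  induction t with
  | zero =>
    intro e s ans cnt hem hsr hse hmod hbnd g hg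
    have hfuel : g + 0 + (refStart ls kN m - s) = (g + (refStart ls kN m - s) - 1) + 1 := by omega
    have hne : ¬ ((e : Int) < n) := by
      rw [hn]; exact_mod_cast (by omega : ¬ (e < m))
    rw [hfuel, solutionLoop, if_neg hne]
    rfl
  | succ t ih =>
    intro e s ans cnt hem hsr hse hmod hbnd g hg
    have hem' : e < m := by omega
    have hel : e < ls.length := by omega
    have hlt : (e : Int) < n := by rw [hn]; exact_mod_cast hem'
    set v := ls.getD e 0 with hv
    by_cases hce : cntW ls v s e = kN
    · -- window already holds k copies of v: inner steps then one else step
      obtain ⟨cnt', hmod', hc', hloop⟩ :=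
        inner_lemma hn hk hml hkN hem' (e - s) s ans cnt
          (g + t + (refStart ls kN m - (firstOcc ls v s e + 1)) + 1) rfl hse hmod hce
      set fo := firstOcc ls v s e with hfo_def
      rw [← hv] at hc'
      have hfo := firstOcc_spec (ls := ls) (v := v) (s := s) (e := e) (by rw [hce]; omega)
      obtain ⟨hb1, hb2, hb3, hb4, hb5⟩ := bridge1 (rfl) hce hkN hse
      have hrs1 : refStart ls kN (e+1) = fo + 1 := by
        simp only [refStart, ← hv]
        rw [if_pos hb1, hb2, ← hsr, ← hfo_def]
        omega
      have hmono : fo + 1 ≤ refStart ls kN m := by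
        rw [← hrs1]; exact refStart_mono ls kN (by omega)
      have hfuel : g + (t+1) + (refStart ls kN m - s)
          = (g + t + (refStart ls kN m - (fo + 1)) + 1) + (fo + 1 - s) := by omega
      rw [hfuel, hloop]
      -- one else step
      rw [solutionLoop, if_pos hlt, pyget_some hel]
      dsimp only
      rw [← hv, if_neg (by rw [hmod' v, hc', hk]; omega)]
      have hmod2 : ∀ u, (cnt'.insert v (cnt'.getD v 0 + 1)).getD u 0
          = (cntW ls u (fo+1) (e+1) : Int) := by
        intro u
        rw [PySem.Dict.getD_insert]
        split
        · next hu =>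
          rw [hu, hmod' v, cntW_succ, if_pos ⟨hv.symm, by omega⟩, hc']
          push_cast [Nat.cast_sub hkN]
          ring
        · next hu =>
          rw [hmod' u, cntW_succ, if_neg (by intro hcon; exact hu (by rw [hv]; exact hcon.1.symm))]
          push_cast; ring
      have hbnd2 : ∀ u, cntW ls u (fo+1) (e+1) ≤ kN := by
        intro u
        by_cases hu : u = v
        · subst hu
          rw [cntW_succ, if_pos ⟨hv.symm, by omega⟩, hc']
          omega
        · rw [cntW_succ, if_neg (by intro hcon; exact hu (by rw [hv]; exact hcon.1.symm))]
          calc cntW ls u (fo+1) e + 0 = cntW ls u (fo+1) e := by omega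
          _ ≤ cntW ls u s e := cntW_anti ls u e (by omega)
          _ ≤ kN := hbnd u
      have he1 : ((e : Int) + 1) = ((e + 1 : Nat) : Int) := by push_cast; ring
      rw [he1]
      rw [ih (e+1) (fo+1) _ _ (by omega) hrs1.symm (by omega) hmod2 hbnd2 g hg]
      rw [refGo]
      congr 1
      rw [hrs1]
      push_cast
      ring
    · -- fewer than k copies: a single else step
      have hclt : cntW ls v s e < kN := lt_of_le_of_ne (hbnd v) hce
      have hrs1 : refStart ls kN (e+1) = s := by
        simp only [refStart, ← hv]
        split
        · next hlen =>
          have := bridge2 rfl hclt hse hlen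
          rw [← hv] at this
          rw [← hsr]
          omega
        · exact hsr.symm
      have hfuel : g + (t+1) + (refStart ls kN m - s) = (g + t + (refStart ls kN m - s)) + 1 := by omega
      rw [hfuel, solutionLoop, if_pos hlt, pyget_some hel]
      dsimp only
      rw [← hv, if_neg (by rw [hmod v, hk]; exact_mod_cast (by omega : ¬ (cntW ls v s e ≥ kN)))]
      have hmod2 : ∀ u, (cnt.insert v (cnt.getD v 0 + 1)).getD u 0
          = (cntW ls u s (e+1) : Int) := by
        intro u
        rw [PySem.Dict.getD_insert]
        split
        · next hu =>
          rw [hu, hmod v, cntW_succ, if_pos ⟨hv.symm, hse⟩]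
          push_cast; ring
        · next hu =>
          rw [hmod u, cntW_succ, if_neg (by intro hcon; exact hu (by rw [hv]; exact hcon.1.symm))]
          push_cast; ring
      have hbnd2 : ∀ u, cntW ls u s (e+1) ≤ kN := by
        intro u
        by_cases hu : u = v
        · subst hu; rw [cntW_succ, if_pos ⟨hv.symm, hse⟩]; omega
        · rw [cntW_succ, if_neg (by intro hcon; exact hu (by rw [hv]; exact hcon.1.symm))]
          have := hbnd u; omega
      have he1 : ((e : Int) + 1) = ((e + 1 : Nat) : Int) := by push_cast; ring
      rw [he1]
      rw [ih (e+1) s _ _ (by omega) hrs1.symm (by omega) hmod2 hbnd2 g hg]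
      rw [refGo]
      congr 1
      rw [hrs1]
      push_cast
      ring

lemma bLoop_lemma {n k : Int} {ls : List Int} {m kN : Nat}
    (hn : n = (m : Int)) (hk : k = (kN : Int)) (hml : m ≤ ls.length) :
    ∀ t e ans s pos, e + t = m → s = refStart ls kN e →
    (∀ u, pos.getD u [] = (occN ls u e).map (fun (i : Nat) => (i : Int))) →
    ((PySem.List.pyRange (e : Int) n 1).foldl (solutionAltStep k ls) (ans, (s : Int), pos)).1
      = refGo ls kN t e ans := by
  intro t
  induction t with
  | zero =>
    intro e ans s pos hem hsr hpos
    rw [PySem.List.pyRange_one_eq_nil (by rw [hn]; exact_mod_cast (by omega : m ≤ e))]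
    rfl
  | succ t ih =>
    intro e ans s pos hem hsr hpos
    have hem' : e < m := by omega
    have hel : e < ls.length := by omega
    have hlt : (e : Int) < n := by rw [hn]; exact_mod_cast hem'
    rw [PySem.List.pyRange_one_cons hlt, List.foldl_cons]
    set v := ls.getD e 0 with hv
    have hocc : pos.getD v [] ++ [(e : Int)] = (occN ls v (e+1)).map (fun (i : Nat) => (i : Int)) := by
      rw [hpos v, occN_succ, ← hv, if_pos rfl]
      simp
    have hL0 : (pos.getD v [] ++ [(e : Int)]).length = (occN ls v (e+1)).length := by
      rw [hocc, List.length_map]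
    have hstart : (if k < ((pos.getD v [] ++ [(e : Int)]).length : Int) then
          match PySem.List.pyGet? (pos.getD v [] ++ [(e : Int)]) (-k-1) with
          | none => ((s : Nat) : Int)
          | some p => max ((s : Nat) : Int) (p+1)
        else ((s : Nat) : Int)) = ((refStart ls kN (e+1) : Nat) : Int) := by
      have hrs : refStart ls kN (e+1)
          = if kN + 1 ≤ (occN ls v (e+1)).length
            then max (refStart ls kN e) ((occN ls v (e+1)).getD ((occN ls v (e+1)).length - (kN+1)) 0 + 1)
            else refStart ls kN e := by
        simp only [refStart, ← hv]
      by_cases hL : kN + 1 ≤ (occN ls v (e+1)).length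
      · rw [if_pos (by rw [hL0, hk]; exact_mod_cast (by omega : kN < (occN ls v (e+1)).length))]
        have hneg : -k - 1 = -(((kN + 1 : Nat) : Int)) := by rw [hk]; push_cast; ring
        rw [hneg, PySem.List.pyGet?_neg_natCast (pos.getD v [] ++ [(e : Int)]) (kN+1) (by omega) (by rw [hL0]; omega)]
        rw [List.getElem?_eq_getElem (by rw [hL0]; omega)]
        dsimp only
        have hidx : (occN ls v (e+1)).length - (kN+1) < (occN ls v (e+1)).length := by omega
        have hgetm : (pos.getD v [] ++ [(e : Int)])[(pos.getD v [] ++ [(e : Int)]).length - (kN+1)]'(by rw [hL0]; omega) =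
            (((occN ls v (e+1)).getD ((occN ls v (e+1)).length - (kN+1)) 0 : Nat) : Int) := by
          rw [List.getD_eq_getElem _ _ hidx]
          simp only [hocc, List.length_map, List.getElem_map]
        rw [hgetm, hrs, if_pos hL, ← hsr]
        push_cast [Nat.cast_max]
        ring_nf
      · rw [if_neg (by rw [hL0, hk]; exact_mod_cast (by omega : ¬ kN < (occN ls v (e+1)).length))]
        rw [hrs, if_neg hL, ← hsr]
    have hpos2 : ∀ u, (pos.insert v (pos.getD v [] ++ [(e : Int)])).getD u []
        = (occN ls u (e+1)).map (fun (i : Nat) => (i : Int)) := by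
      intro u
      rw [PySem.Dict.getD_insert]
      split
      · next hu => rw [hu]; exact hocc
      · next hu =>
        rw [hpos u, occN_succ, if_neg (by intro hcon; exact hu (by rw [hv]; exact hcon.symm)), List.append_nil]
    have hstep : solutionAltStep k ls (ans, (s : Int), pos) (e : Int)
        = (max ans ((e : Int) - ((refStart ls kN (e+1) : Nat) : Int) + 1),
           ((refStart ls kN (e+1) : Nat) : Int), pos.insert v (pos.getD v [] ++ [(e : Int)])) := by
      simp only [solutionAltStep, pyget_some hel]
      rw [← hv]
      rw [hstart]
    rw [hstep]
    have he1 : ((e : Int) + 1) = ((e + 1 : Nat) : Int) := by push_cast; ring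
    have := ih (e+1) (max ans ((e : Int) - ((refStart ls kN (e+1) : Nat) : Int) + 1))
      (refStart ls kN (e+1)) _ (by omega) rfl hpos2
    rw [← he1] at this
    rw [this]
    show _ = refGo ls kN (t+1) e ans
    rw [refGo]
    congr 1
    push_cast
    ring

lemma a_zero_lemma {n k : Int} {ls : List Int} {m : Nat}
    (hn : n = (m : Int)) (hk : k = 0) (hml : m ≤ ls.length) :
    ∀ t e ans cnt, e + t = m → 0 ≤ ans →
    (∀ u, (cnt : PySem.Dict Int Int).getD u 0 = 0) →
    ∀ g, 1 ≤ g →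
    solutionLoop n k ls (g + 2*t) ans (e : Int) (e : Int) cnt = ans := by
  intro t
  induction t with
  | zero =>
    intro e ans cnt hem hans hcnt g hg
    obtain ⟨g', rfl⟩ : ∃ g', g = g' + 1 := ⟨g - 1, by omega⟩
    have hnot : ¬ ((e : Int) < n) := by
      rw [hn]; exact_mod_cast (by omega : ¬ e < m)
    have h0 : g' + 1 + 2*0 = g' + 1 := by omega
    rw [h0, solutionLoop, if_neg hnot]
  | succ t ih =>
    intro e ans cnt hem hans hcnt g hg
    have hel : e < ls.length := by omega
    have hlt : (e : Int) < n := by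
      rw [hn]; exact_mod_cast (by omega : e < m)
    have h1 : g + 2*(t+1) = (g + 2*t + 1) + 1 := by omega
    rw [h1, solutionLoop, if_pos hlt, pyget_some hel]
    dsimp only
    rw [if_pos (by rw [hcnt, hk])]
    rw [solutionLoop, if_pos hlt, pyget_some hel]
    dsimp only
    rw [if_neg (by rw [PySem.Dict.getD_insert_self, hcnt, hk]; omega)]
    have hmax : max ans ((e:Int)+1 - ((e:Int)+1)) = ans := by
      rw [sub_self]; exact max_eq_left hans
    rw [hmax]
    have hcnt2 : ∀ u, ((cnt.insert (ls.getD e 0) (cnt.getD (ls.getD e 0) 0 - 1)).insert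
        (ls.getD e 0) ((cnt.insert (ls.getD e 0) (cnt.getD (ls.getD e 0) 0 - 1)).getD (ls.getD e 0) 0 + 1)).getD u 0 = 0 := by
      intro u
      rw [PySem.Dict.getD_insert]
      split
      · rw [PySem.Dict.getD_insert_self, hcnt]; norm_num
      · next h => rw [PySem.Dict.getD_insert_of_ne _ _ _ h, hcnt]
    have hcast : ((e : Int) + 1) = ((e+1 : Nat) : Int) := by push_cast; ring
    rw [hcast]
    exact ih (e+1) ans _ (by omega) hans hcnt2 g hg

lemma refStart_zero_succ (ls : List Int) (e : Nat) : refStart ls 0 (e+1) = e + 1 := by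
  have ho : occN ls (ls.getD e 0) (e+1) = occN ls (ls.getD e 0) e ++ [e] := by
    rw [occN_succ, if_pos rfl]
  have hlen : (occN ls (ls.getD e 0) (e+1)).length = (occN ls (ls.getD e 0) e).length + 1 := by
    rw [ho]; simp
  have hlast : (occN ls (ls.getD e 0) (e+1)).getD ((occN ls (ls.getD e 0) (e+1)).length - 1) 0 = e := by
    rw [ho]
    have : (occN ls (ls.getD e 0) e ++ [e]).length - 1 = (occN ls (ls.getD e 0) e).length := by simp
    rw [this, List.getD_eq_getElem?_getD, List.getElem?_append_right (le_refl _), Nat.sub_self]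
    rfl
  simp only [refStart]
  rw [if_pos (by omega), hlast]
  have := refStart_le ls 0 e
  omega

lemma refGo_zero (ls : List Int) : ∀ t e, refGo ls 0 t e 0 = 0 := by
  intro t
  induction t with
  | zero => intro e; rfl
  | succ t ih =>
    intro e
    rw [refGo, refStart_zero_succ]
    have : ((e:Int) + 1 - ((e+1 : Nat) : Int)) = 0 := by push_cast; ring
    rw [this]
    simpa using ih (e+1)

-- ===== VERDICT (by name: the statement is the Claim_ definition above) =====
theorem solution_spec : Claim_equal_solution := by
  intro n k ls hdom hpre
  obtain ⟨hk0, hnl⟩ := hpre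
  unfold Spec_solution
  by_cases hneg : n < 0
  · -- empty loop on both sides
    have h0 : (2*n).toNat = 0 := by omega
    rw [solution, h0, solutionLoop, if_neg (by omega)]
    rw [solution_alt, PySem.List.pyRange_one_eq_nil (by omega)]
    rfl
  · push_neg at hneg
    have hn : n = ((n.toNat : Nat) : Int) := by omega
    have hml : n.toNat ≤ ls.length := by omega
    have hk : k = ((k.toNat : Nat) : Int) := by omega
    have hB : solution_alt n k ls = refGo ls k.toNat n.toNat 0 0 := by
      rw [solution_alt]
      have := bLoop_lemma hn hk hml n.toNat 0 0 0 PySem.Dict.empty (by omega) rfl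
        (by intro u; rw [PySem.Dict.getD_empty]; simp [occN])
      rw [← this]
      rfl
    by_cases hkz : k = 0
    · -- k = 0 : both sides give 0
      have hA : solution n k ls = 0 := by
        rw [solution]
        have hfuel : (2*n).toNat + 1 = 1 + 2*n.toNat := by omega
        rw [hfuel]
        exact a_zero_lemma hn hkz hml n.toNat 0 0 PySem.Dict.empty (by omega) (le_refl 0)
          (by intro u; rw [PySem.Dict.getD_empty]) 1 (le_refl 1)
      have hkz' : k.toNat = 0 := by omega
      rw [hA, hB, hkz', refGo_zero]
    · -- 1 ≤ k : the sliding-window argument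
      have hkN : 1 ≤ k.toNat := by omega
      have hA : solution n k ls = refGo ls k.toNat n.toNat 0 0 := by
        rw [solution]
        have hfuel : (2*n).toNat + 1 =
            (n.toNat - refStart ls k.toNat n.toNat + 1) + n.toNat + (refStart ls k.toNat n.toNat - 0) := by
          have := refStart_le ls k.toNat n.toNat
          omega
        rw [hfuel]
        exact outer_lemma hn hk hml hkN n.toNat 0 0 0 PySem.Dict.empty (by omega) rfl (by omega)
          (by intro u; rw [PySem.Dict.getD_empty]; simp [cntW, occN])
          (by intro u; simp [cntW, occN]) _ (by omega)
      rw [hA, hB]
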